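-- pv_equiv track=rewrite | github.com/pro2p/YoutubeMusicPlaylistManager.V3 | playlistManager.py | sort_musics_of_artists_alphabetically
-- ===== SOURCE A (Python) =====
-- import copy
--
-- def sort_musics_of_artists_alphabetically(music_list, reverse = False):
--     new_list_order = [None for i in range(len(music_list))]
--     list_artists = list_all_artists(music_list)
--     for artist in list_artists:
--         #query all the positions (numbers) for the given artist (indexes of their musics in the playlist)
--         positions = []
--         for count, music in enumerate(music_list):
--             if music[1]==artist:
--                 positions.append(count)
--         new_positions = copy.deepcopy(positions)
--         new_positions.sort(key=lambda item:music_list[item][2].lower(),reverse=reverse)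
--         for i in range(len(positions)):
--             new_list_order[positions[i]] = new_positions[i]
--     sorted_music_list = []
--     for element in new_list_order:
--         sorted_music_list.append(music_list[element])
--     return sorted_music_list
--
-- def list_all_artists(music_list):
--     #query all artists in the playlist
--     list_artists = []
--     for music in music_list:
--         if not music[1] in list_artists:
--             list_artists.append(music[1])
--     return list_artists
-- ===== SOURCE B (Python) =====
-- def sort_musics_of_artists_alphabetically(music_list, reverse = False):
--     # group the songs per artist in appearance order
--     groups = {}
--     for music in music_list:
--         groups.setdefault(music[1], []).append(music)
--     # sort each artist's group alphabetically by title (stable, same key as the task)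
--     for artist in groups:
--         groups[artist] = sorted(groups[artist], key=lambda m: m[2].lower(), reverse=reverse)
--     # one forward pass: slot i receives the next sorted song of slot i's artist
--     counts = {}
--     result = []
--     for music in music_list:
--         artist = music[1]
--         k = counts.get(artist, 0)
--         result.append(groups[artist][k])
--         counts[artist] = k + 1
--     return result
-- ===== Notes on version B (the rewrite author's own statement) =====
-- stated objective: alternative
-- what changed: A builds a position-permutation array by scanning the whole list once per distinct artist and scattering sorted indices into slots; B makes one grouping pass into a dict of per-artist song lists, sorts each group once, and fills the output in a single forward pass with per-artist counters.
import Mathlib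
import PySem

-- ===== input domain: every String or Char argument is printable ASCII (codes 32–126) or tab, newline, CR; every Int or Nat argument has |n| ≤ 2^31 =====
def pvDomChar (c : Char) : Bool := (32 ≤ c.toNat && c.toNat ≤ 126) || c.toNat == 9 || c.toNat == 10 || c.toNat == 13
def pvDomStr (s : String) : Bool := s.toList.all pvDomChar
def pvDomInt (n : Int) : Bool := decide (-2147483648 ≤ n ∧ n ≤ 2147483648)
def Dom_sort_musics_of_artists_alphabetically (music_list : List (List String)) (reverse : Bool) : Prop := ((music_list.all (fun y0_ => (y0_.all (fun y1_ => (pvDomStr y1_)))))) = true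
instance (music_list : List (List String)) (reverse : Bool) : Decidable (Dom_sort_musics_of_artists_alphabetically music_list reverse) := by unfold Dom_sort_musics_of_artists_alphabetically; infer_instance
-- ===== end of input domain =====

-- B replaces A's per-artist position-permutation array by a dict of per-artist sorted groups
-- drained with per-artist counters in one forward pass (alternative decomposition, same values).

-- ===== PORT A =====
-- helper of A; music[1] is ported as pyGetD … 1 "" (always in range under Pre_)
def list_all_artists (music_list : List (List String)) : List String :=
  music_list.foldl (fun acc music =>
    if PySem.List.pyGetD music 1 "" ∈ acc then acc else acc ++ [PySem.List.pyGetD music 1 ""]) []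

-- literal port of A; list indices written by the scatter loop are the enumerate counts, hence
-- nonnegative and in range, so `.set ….toNat` and the `none → []` fallback are never the
-- out-of-range/None cases (every slot is written exactly once before the final read-back)
def sort_musics_of_artists_alphabetically (music_list : List (List String)) (reverse : Bool) : List (List String) :=
  let new_list_order0 : List (Option Int) := (List.range music_list.length).map (fun _ => none)
  let list_artists := list_all_artists music_list
  let new_list_order := list_artists.foldl (fun nlo artist =>
    let positions : List Int := (PySem.List.enumerate music_list 0).foldl
      (fun ps cm => if PySem.List.pyGetD cm.2 1 "" == artist then ps ++ [cm.1] else ps) []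
    let new_positions := PySem.List.sorted positions
      (fun item => PySem.Str.lower (PySem.List.pyGetD (PySem.List.pyGetD music_list item []) 2 "")) reverse
    (PySem.List.pyRange 0 (positions.length : Int) 1).foldl
      (fun nlo i => nlo.set (PySem.List.pyGetD positions i 0).toNat
        (some (PySem.List.pyGetD new_positions i 0))) nlo) new_list_order0
  new_list_order.foldl (fun out e =>
    out ++ [match e with | some i => PySem.List.pyGetD music_list i [] | none => []]) []

-- ===== PORT B =====
-- literal port of Source B: group per artist, sort each group once, drain with counters
def sort_musics_of_artists_alphabetically_alt (music_list : List (List String)) (reverse : Bool) : List (List String) :=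
  let groups : PySem.Dict String (List (List String)) :=
    music_list.foldl (fun d music => d.modify (PySem.List.pyGetD music 1 "") [] (· ++ [music]))
      PySem.Dict.empty
  let groups2 := groups.keys.foldl (fun d artist =>
    d.insert artist (PySem.List.sorted (d.getD artist [])
      (fun m => PySem.Str.lower (PySem.List.pyGetD m 2 "")) reverse)) groups
  let fin := music_list.foldl (fun st music =>
    let artist := PySem.List.pyGetD music 1 ""
    let k := st.2.getD artist 0
    (st.1 ++ [PySem.List.pyGetD (groups2.getD artist []) k []], st.2.insert artist (k + 1)))
    (([] : List (List String)), (PySem.Dict.empty : PySem.Dict String Int))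
  fin.1

-- ===== PRECONDITION & SPEC =====
-- Pre_ excludes exactly the inputs on which A raises IndexError: an entry shorter than 3
-- (music[1] is read for every entry, and the sort key reads music[2] of every entry)
def Pre_sort_musics_of_artists_alphabetically (music_list : List (List String)) (reverse : Bool) : Prop :=
  ∀ m ∈ music_list, 3 ≤ m.length
instance (music_list : List (List String)) (reverse : Bool) : Decidable (Pre_sort_musics_of_artists_alphabetically music_list reverse) := by unfold Pre_sort_musics_of_artists_alphabetically; infer_instance

def pvWitness_sort_musics_of_artists_alphabetically : List (List String) × Bool :=
  ([["id1", "artist A", "b song"], ["id2", "artist A", "a song"], ["id3", "Z", "c"]], false)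

def Spec_sort_musics_of_artists_alphabetically (music_list : List (List String)) (reverse : Bool) (out : List (List String)) : Prop := out = sort_musics_of_artists_alphabetically_alt music_list reverse
instance (music_list : List (List String)) (reverse : Bool) (out : List (List String)) : Decidable (Spec_sort_musics_of_artists_alphabetically music_list reverse out) := by unfold Spec_sort_musics_of_artists_alphabetically; infer_instance

-- ===== CLAIM (what is proved, stated in full; the proofs are below) =====
def Claim_equal_sort_musics_of_artists_alphabetically : Prop := ∀ (music_list : List (List String)) (reverse : Bool), Dom_sort_musics_of_artists_alphabetically music_list reverse → Pre_sort_musics_of_artists_alphabetically music_list reverse → Spec_sort_musics_of_artists_alphabetically music_list reverse (sort_musics_of_artists_alphabetically music_list reverse)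

-- ===== LEMMAS AND PROOFS =====

-- the artist and title-key projections both programs use
def pvArt (m : List String) : String := PySem.List.pyGetD m 1 ""
def pvKey (m : List String) : String := PySem.Str.lower (PySem.List.pyGetD m 2 "")
-- the songs of artist a, in appearance order
def pvGrp (L : List (List String)) (a : String) : List (List String) :=
  L.filter (fun m => pvArt m == a)
-- how many earlier slots share slot j's artist
def pvCnt (L : List (List String)) (j : Nat) : Nat :=
  (L.take j).countP (fun m => pvArt m == pvArt (L.getD j []))
-- the common reference value of output slot j
def pvRef (L : List (List String)) (rev : Bool) (j : Nat) : List String :=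
  PySem.List.pyGetD (PySem.List.sorted (pvGrp L (pvArt (L.getD j []))) pvKey rev) (pvCnt L j : Int) []
-- the indices (as Python ints) of artist a's songs, in increasing order
def pvPos (L : List (List String)) (a : String) : List Int :=
  ((PySem.List.enumerate L 0).filter (fun cm => pvArt cm.2 == a)).map (·.1)

-- (1) list_all_artists is set(artists) in first-appearance order
theorem pv_artists_eq (L : List (List String)) :
    list_all_artists L = PySem.Set.ofList (L.map pvArt) := by
  rw [list_all_artists, ← PySem.Set.update_empty, PySem.Set.update_map_eq_foldl_add]
  exact PySem.List.foldl_congr_mem L _ _ _ (fun acc m _ => by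
    rw [PySem.Set.add_eq_ite]; rfl)

-- (2) the positions loop builds pvPos
theorem pv_pos_eq (L : List (List String)) (a : String) :
    (PySem.List.enumerate L 0).foldl
      (fun ps cm => if PySem.List.pyGetD cm.2 1 "" == a then ps ++ [cm.1] else ps) []
      = pvPos L a := by
  rw [PySem.List.foldl_append_if (fun cm : Int × List String => PySem.List.pyGetD cm.2 1 "" == a)
    (fun cm : Int × List String => cm.1)]
  rfl

theorem pv_pos_mem (L : List (List String)) (a : String) (p : Int) (hp : p ∈ pvPos L a) :
    ∃ (k : Nat) (hk : k < L.length), p = (k : Int) ∧ pvArt L[k] = a := by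
  obtain ⟨cm, hcm, rfl⟩ := List.mem_map.mp hp
  obtain ⟨hcm1, hcm2⟩ := List.mem_filter.mp hcm
  obtain ⟨k, hk, rfl⟩ := (PySem.List.mem_enumerate_iff L 0 cm).mp hcm1
  exact ⟨k, hk, by simp, by simpa [pvArt] using beq_iff_eq.mp hcm2⟩

theorem pv_pos_nodup (L : List (List String)) (a : String) : (pvPos L a).Nodup := by
  have h1 := (PySem.List.pairwise_lt_enumerate L 0).filter (fun cm => pvArt cm.2 == a)
  have h2 := h1.map (f := fun cm : Int × List String => cm.1) (S := fun p q => p < q)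
    (fun _ _ h => h)
  exact h2.imp (fun h => ne_of_lt h)

-- filtering on the entry then projecting the entry forgets the enumeration counter
theorem pv_filter_enum_snd (p : List String → Bool) :
    ∀ (xs : List (List String)) (s : Int),
    ((PySem.List.enumerate xs s).filter (fun cm => p cm.2)).map (·.2) = xs.filter p := by
  intro xs
  induction xs with
  | nil => intro s; rfl
  | cons x xs ih =>
    intro s
    rw [PySem.List.enumerate_cons, List.filter_cons, List.filter_cons]
    by_cases hx : p x
    · simp only [hx, if_pos]
      simp [ih (s + 1)]
    · simp only [hx]
      simp [ih (s + 1)]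

theorem pv_pos_get (L : List (List String)) (a : String) :
    (pvPos L a).map (fun i => PySem.List.pyGetD L i []) = pvGrp L a := by
  rw [pvPos, List.map_map]
  have : ∀ cm ∈ (PySem.List.enumerate L 0).filter (fun cm => pvArt cm.2 == a),
      ((fun i => PySem.List.pyGetD L i []) ∘ (·.1)) cm = cm.2 := by
    intro cm hcm
    obtain ⟨k, hk, rfl⟩ := (PySem.List.mem_enumerate_iff L 0 cm).mp (List.mem_filter.mp hcm).1
    simp only [Function.comp_apply, zero_add]
    rw [PySem.List.pyGetD_natCast, List.getD_eq_getElem _ _ hk]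
  rw [List.map_congr_left this]
  exact pv_filter_enum_snd (fun m => pvArt m == a) L 0

-- decomposition of the positions and the group at a slot j
theorem pv_pos_decomp (L : List (List String)) (j : Nat) (hj : j < L.length) :
    ∃ P S : List Int, pvPos L (pvArt L[j]) = P ++ (j : Int) :: S ∧ P.length = pvCnt L j := by
  have hsplit : L = L.take j ++ L[j] :: L.drop (j + 1) := by
    rw [← List.drop_eq_getElem_cons hj, List.take_append_drop]
  have htl : (L.take j).length = j := by simp [List.length_take]; omega
  have h1 : pvPos L (pvArt L[j])
      = (((PySem.List.enumerate (L.take j) 0).filter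
          (fun cm => pvArt cm.2 == pvArt L[j])).map (fun cm : Int × List String => cm.1))
        ++ (j : Int) :: (((PySem.List.enumerate (L.drop (j + 1)) ((j : Int) + 1)).filter
          (fun cm => pvArt cm.2 == pvArt L[j])).map (fun cm : Int × List String => cm.1)) := by
    rw [pvPos]
    generalize ha : pvArt L[j] = a
    conv_lhs => rw [hsplit]
    rw [PySem.List.enumerate_append, PySem.List.enumerate_cons, htl]
    rw [List.filter_append, List.filter_cons]
    simp [ha]
  refine ⟨_, _, h1, ?_⟩
  have := congrArg List.length (pv_filter_enum_snd (fun m => pvArt m == pvArt L[j]) (L.take j) 0)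
  simp only [List.length_map] at this ⊢
  rw [this, pvCnt, List.getD_eq_getElem _ _ hj, List.countP_eq_length_filter]

theorem pv_grp_decomp (L : List (List String)) (j : Nat) (hj : j < L.length) :
    ∃ P S : List (List String), pvGrp L (pvArt L[j]) = P ++ L[j] :: S ∧ P.length = pvCnt L j := by
  have hsplit : L = L.take j ++ L[j] :: L.drop (j + 1) := by
    rw [← List.drop_eq_getElem_cons hj, List.take_append_drop]
  have h1 : pvGrp L (pvArt L[j])
      = ((L.take j).filter (fun m => pvArt m == pvArt L[j]))
        ++ L[j] :: ((L.drop (j + 1)).filter (fun m => pvArt m == pvArt L[j])) := by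
    rw [pvGrp]
    generalize ha : pvArt L[j] = a
    conv_lhs => rw [hsplit]
    rw [List.filter_append, List.filter_cons]
    simp [ha]
  refine ⟨_, _, h1, ?_⟩
  rw [pvCnt, List.getD_eq_getElem _ _ hj, List.countP_eq_length_filter]

-- stable sort commutes with mapping the decorated element through h
theorem pv_insertBy_map {α β : Type} (h : α → β) (bef : β → β → Bool) (x : α) :
    ∀ ys : List α, PySem.List.insertBy bef (h x) (ys.map h)
      = (PySem.List.insertBy (fun a b => bef (h a) (h b)) x ys).map h := by
  intro ys
  induction ys with
  | nil => rfl
  | cons y ys ih =>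
    by_cases hb : bef (h x) (h y) <;> simp [PySem.List.insertBy, hb, ih]

theorem pv_foldl_insertBy_map {α β : Type} (h : α → β) (bef : β → β → Bool) :
    ∀ (l : List α) (acc : List α),
    (l.foldl (fun acc x => PySem.List.insertBy (fun a b => bef (h a) (h b)) x acc) acc).map h
      = (l.map h).foldl (fun acc y => PySem.List.insertBy bef y acc) (acc.map h) := by
  intro l
  induction l with
  | nil => intro acc; rfl
  | cons x l ih =>
    intro acc
    simp only [List.map_cons, List.foldl_cons]
    rw [ih, pv_insertBy_map]

theorem pv_sorted_map {α β κ : Type} [LT κ] [DecidableLT κ] (h : α → β) (k : β → κ)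
    (rev : Bool) (l : List α) :
    (PySem.List.sorted l (fun x => k (h x)) rev).map h = PySem.List.sorted (l.map h) k rev := by
  cases rev
  · rw [PySem.List.sorted_eq_foldl_insertBy, PySem.List.sorted_eq_foldl_insertBy,
      pv_foldl_insertBy_map h (fun a b => decide (k a < k b))]
    rfl
  · rw [PySem.List.sorted_rev_eq_foldl_insertBy, PySem.List.sorted_rev_eq_foldl_insertBy,
      pv_foldl_insertBy_map h (fun a b => decide (k b < k a))]
    rfl

-- the scatter loop, as a fold over the zipped (target slot, written index) pairs
theorem pv_zipfold_length (l : List (Int × Int)) :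
    ∀ (nlo : List (Option Int)),
    (l.foldl (fun nlo pq => nlo.set pq.1.toNat (some pq.2)) nlo).length = nlo.length := by
  induction l with
  | nil => intro nlo; rfl
  | cons pq l ih => intro nlo; rw [List.foldl_cons, ih, List.length_set]

theorem pv_zipfold_not_mem :
    ∀ (ps qs : List Int) (nlo : List (Option Int)) (j : Nat),
    (j : Int) ∉ ps → (∀ p ∈ ps, 0 ≤ p) →
    ((ps.zip qs).foldl (fun nlo pq => nlo.set pq.1.toNat (some pq.2)) nlo)[j]? = nlo[j]? := by
  intro ps
  induction ps with
  | nil => intro qs nlo j _ _; rfl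
  | cons p ps ih =>
    intro qs nlo j hj hpos
    cases qs with
    | nil => rfl
    | cons q qs =>
      rw [List.zip_cons_cons, List.foldl_cons]
      rw [ih qs _ j (fun h => hj (List.mem_cons_of_mem _ h)) (fun p hp => hpos p (List.mem_cons_of_mem _ hp))]
      have hp0 : 0 ≤ p := hpos p List.mem_cons_self
      have : p.toNat ≠ j := by
        intro h
        exact hj (by rw [← h, Int.toNat_of_nonneg hp0]; exact List.mem_cons_self)
      exact List.getElem?_set_ne this

theorem pv_zipfold_mem :
    ∀ (ps : List Int) (qs : List Int) (nlo : List (Option Int)) (i : Nat)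
      (hi : i < ps.length) (hiq : i < qs.length),
    ps.Nodup → (∀ p ∈ ps, 0 ≤ p ∧ p.toNat < nlo.length) →
    ((ps.zip qs).foldl (fun nlo pq => nlo.set pq.1.toNat (some pq.2)) nlo)[(ps[i]).toNat]?
      = some (some qs[i]) := by
  intro ps
  induction ps with
  | nil => intro qs nlo i hi; exact absurd hi (by simp)
  | cons p ps ih =>
    intro qs nlo i hi hiq hnd hb
    cases qs with
    | nil => exact absurd hiq (by simp)
    | cons q qs =>
      rw [List.zip_cons_cons, List.foldl_cons]
      obtain ⟨hp, hps⟩ := List.nodup_cons.mp hnd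
      have hp0 := (hb p List.mem_cons_self).1
      have hplen := (hb p List.mem_cons_self).2
      cases i with
      | zero =>
        simp only [List.getElem_cons_zero]
        rw [pv_zipfold_not_mem ps qs _ p.toNat
          (by rw [Int.toNat_of_nonneg hp0]; exact hp)
          (fun x hx => (hb x (List.mem_cons_of_mem _ hx)).1)]
        exact List.getElem?_set_self hplen
      | succ i =>
        simp only [List.getElem_cons_succ]
        exact ih qs _ i (by simpa using hi) (by simpa using hiq) hps
          (fun x hx => ⟨(hb x (List.mem_cons_of_mem _ hx)).1,
            by rw [List.length_set]; exact (hb x (List.mem_cons_of_mem _ hx)).2⟩)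

-- the written value at slot j after one artist's scatter pass
def pvVal (L : List (List String)) (rev : Bool) (j : Nat) : Int :=
  (PySem.List.sorted (pvPos L (pvArt (L.getD j [])))
    (fun item => PySem.Str.lower (PySem.List.pyGetD (PySem.List.pyGetD L item []) 2 "")) rev).getD
    (pvCnt L j) 0

-- the index loop over range(len(positions)) is the fold over the zipped pairs
theorem pv_range_fold_eq_zip (ps : List Int) (keyf : Int → String) (rev : Bool)
    (nlo : List (Option Int)) :
    (PySem.List.pyRange 0 (ps.length : Int) 1).foldl
      (fun nlo i => nlo.set (PySem.List.pyGetD ps i 0).toNat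
        (some (PySem.List.pyGetD (PySem.List.sorted ps keyf rev) i 0))) nlo
      = (ps.zip (PySem.List.sorted ps keyf rev)).foldl
          (fun nlo pq => nlo.set pq.1.toNat (some pq.2)) nlo := by
  have hz : ((ps.zip (PySem.List.sorted ps keyf rev)).length : Int) = (ps.length : Int) := by
    simp [List.length_zip, PySem.List.length_sorted]
  rw [← hz]
  rw [PySem.List.foldl_congr_mem _ _
    (fun nlo i => nlo.set ((PySem.List.pyGetD (ps.zip (PySem.List.sorted ps keyf rev)) i (0, 0)).1).toNat
      (some (PySem.List.pyGetD (ps.zip (PySem.List.sorted ps keyf rev)) i (0, 0)).2)) _ ?_]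
  · exact PySem.List.foldl_pyRange_zero_pyGetD' (ps.zip (PySem.List.sorted ps keyf rev)) (0, 0)
      (fun acc pq => acc.set pq.1.toNat (some pq.2)) nlo
  · intro acc i hi
    obtain ⟨h0, h1⟩ := PySem.List.mem_pyRange_one.mp hi
    beta_reduce
    have hzl : (ps.zip (PySem.List.sorted ps keyf rev)).length = ps.length := by
      simp [List.length_zip, PySem.List.length_sorted]
    have hilt : i < ((ps.zip (PySem.List.sorted ps keyf rev)).length : Int) := by omega
    rw [PySem.List.pyGetD_eq_getElem (ps.zip (PySem.List.sorted ps keyf rev)) (0, 0) h0 hilt,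
      PySem.List.pyGetD_eq_getElem ps 0 h0 (by omega),
      PySem.List.pyGetD_eq_getElem (PySem.List.sorted ps keyf rev) 0 h0
        (by rw [PySem.List.length_sorted]; omega)]
    simp [List.getElem_zip]

-- one artist's scatter pass, slot by slot
theorem pv_stepA (L : List (List String)) (rev : Bool) (a : String) (nlo : List (Option Int))
    (hlen : nlo.length = L.length) (j : Nat) (hj : j < L.length) :
    (((pvPos L a).zip (PySem.List.sorted (pvPos L a)
        (fun item => PySem.Str.lower (PySem.List.pyGetD (PySem.List.pyGetD L item []) 2 "")) rev)).foldl
      (fun nlo pq => nlo.set pq.1.toNat (some pq.2)) nlo)[j]?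
      = if pvArt L[j] = a then some (some (pvVal L rev j)) else nlo[j]? := by
  have hbounds : ∀ p ∈ pvPos L a, 0 ≤ p ∧ p.toNat < nlo.length := by
    intro p hp
    obtain ⟨k, hk, rfl, _⟩ := pv_pos_mem L a p hp
    constructor
    · exact Int.natCast_nonneg k
    · rw [Int.toNat_natCast]; omega
  by_cases hea : pvArt L[j] = a
  · subst hea
    rw [if_pos rfl]
    obtain ⟨P, S, hdec, hPlen⟩ := pv_pos_decomp L j hj
    have hi : pvCnt L j < (pvPos L (pvArt L[j])).length := by
      rw [hdec]; simp; omega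
    have hiq : pvCnt L j < (PySem.List.sorted (pvPos L (pvArt L[j]))
        (fun item => PySem.Str.lower (PySem.List.pyGetD (PySem.List.pyGetD L item []) 2 "")) rev).length := by
      rw [PySem.List.length_sorted]; exact hi
    have hgi : (pvPos L (pvArt L[j]))[pvCnt L j]'hi = (j : Int) := by
      have h := List.getElem?_append_right (l₁ := P) (l₂ := (j : Int) :: S)
        (i := pvCnt L j) (by omega)
      rw [← hdec, List.getElem?_eq_getElem hi] at h
      rw [hPlen] at h
      simp at h
      exact h
    have hmain := pv_zipfold_mem (pvPos L (pvArt L[j])) _ nlo (pvCnt L j) hi hiq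
      (pv_pos_nodup L _) hbounds
    rw [hgi] at hmain
    rw [Int.toNat_natCast] at hmain
    rw [hmain]
    have hgd : L.getD j [] = L[j] := List.getD_eq_getElem _ _ hj
    rw [pvVal, hgd, List.getD_eq_getElem _ _ hiq]
  · rw [if_neg hea]
    apply pv_zipfold_not_mem
    · intro hmem
      obtain ⟨k, hk, hkj, hka⟩ := pv_pos_mem L a _ hmem
      have : k = j := by omega
      exact hea (this ▸ hka)
    · exact fun p hp => (hbounds p hp).1

-- the whole per-artist loop: a slot is written iff its artist has been processed
theorem pv_outer (L : List (List String)) (rev : Bool) (arts : List String) :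
    ∀ (nlo : List (Option Int)), nlo.length = L.length →
    (arts.foldl (fun nlo artist =>
        (((pvPos L artist).zip (PySem.List.sorted (pvPos L artist)
          (fun item => PySem.Str.lower (PySem.List.pyGetD (PySem.List.pyGetD L item []) 2 "")) rev)).foldl
          (fun nlo pq => nlo.set pq.1.toNat (some pq.2)) nlo)) nlo).length = L.length ∧
    ∀ (j : Nat) (hj : j < L.length),
      (arts.foldl (fun nlo artist =>
        (((pvPos L artist).zip (PySem.List.sorted (pvPos L artist)
          (fun item => PySem.Str.lower (PySem.List.pyGetD (PySem.List.pyGetD L item []) 2 "")) rev)).foldl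
          (fun nlo pq => nlo.set pq.1.toNat (some pq.2)) nlo)) nlo)[j]?
        = if pvArt L[j] ∈ arts then some (some (pvVal L rev j)) else nlo[j]? := by
  induction arts with
  | nil =>
    intro nlo hlen
    exact ⟨hlen, fun j hj => by simp⟩
  | cons a t ih =>
    intro nlo hlen
    simp only [List.foldl_cons]
    have hlen1 : (((pvPos L a).zip (PySem.List.sorted (pvPos L a)
        (fun item => PySem.Str.lower (PySem.List.pyGetD (PySem.List.pyGetD L item []) 2 "")) rev)).foldl
        (fun nlo pq => nlo.set pq.1.toNat (some pq.2)) nlo).length = L.length := by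
      rw [pv_zipfold_length]; exact hlen
    obtain ⟨ihlen, ihchar⟩ := ih _ hlen1
    refine ⟨ihlen, fun j hj => ?_⟩
    rw [ihchar j hj, pv_stepA L rev a nlo hlen j hj]
    by_cases hmem : pvArt L[j] ∈ t
    · simp [hmem]
    · by_cases heq : pvArt L[j] = a
      · simp [heq]
      · simp [hmem, heq]

-- reading L back through the written index yields the reference value
theorem pv_val_ref (L : List (List String)) (rev : Bool) (j : Nat) (hj : j < L.length) :
    PySem.List.pyGetD L (pvVal L rev j) [] = pvRef L rev j := by
  have hgd : L.getD j [] = L[j] := List.getD_eq_getElem _ _ hj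
  obtain ⟨P, S, hdec, hPlen⟩ := pv_pos_decomp L j hj
  obtain ⟨Pg, Sg, hgdec, hgPlen⟩ := pv_grp_decomp L j hj
  have hcntp : pvCnt L j < (pvPos L (pvArt L[j])).length := by rw [hdec]; simp; omega
  have hcntg : pvCnt L j < (pvGrp L (pvArt L[j])).length := by rw [hgdec]; simp; omega
  have hmapkey : (fun item => PySem.Str.lower (PySem.List.pyGetD (PySem.List.pyGetD L item []) 2 ""))
      = (fun item => pvKey ((fun i => PySem.List.pyGetD L i []) item)) := rfl
  have hmape : (PySem.List.sorted (pvPos L (pvArt L[j]))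
        (fun item => PySem.Str.lower (PySem.List.pyGetD (PySem.List.pyGetD L item []) 2 "")) rev).map
        (fun i => PySem.List.pyGetD L i [])
      = PySem.List.sorted (pvGrp L (pvArt L[j])) pvKey rev := by
    rw [hmapkey, pv_sorted_map (fun i => PySem.List.pyGetD L i []) pvKey rev, pv_pos_get]
  have hcnts : pvCnt L j < (PySem.List.sorted (pvPos L (pvArt L[j]))
      (fun item => PySem.Str.lower (PySem.List.pyGetD (PySem.List.pyGetD L item []) 2 "")) rev).length := by
    rw [PySem.List.length_sorted]; exact hcntp
  rw [pvVal, pvRef, hgd, PySem.List.pyGetD_natCast, ← hmape]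
  rw [List.getD_eq_getElem _ _ hcnts]
  rw [List.getD_eq_getElem _ _ (by simpa using hcnts)]
  rw [List.getElem_map]

def pvFin (L : List (List String)) (e : Option Int) : List String :=
  match e with | some i => PySem.List.pyGetD L i [] | none => []

theorem pv_A_eq (L : List (List String)) (rev : Bool) :
    sort_musics_of_artists_alphabetically L rev = (List.range L.length).map (pvRef L rev) := by
  simp only [sort_musics_of_artists_alphabetically]
  simp only [pv_pos_eq, pv_range_fold_eq_zip]
  have h0len : ((List.range L.length).map (fun _ => (none : Option Int))).length = L.length := by
    simp
  obtain ⟨hlen, hchar⟩ := pv_outer L rev (list_all_artists L) _ h0len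
  rw [show (fun (out : List (List String)) (e : Option Int) =>
      out ++ [match e with | some i => PySem.List.pyGetD L i [] | none => []])
      = (fun (out : List (List String)) (e : Option Int) => out ++ [pvFin L e]) from rfl]
  rw [PySem.List.foldl_append_singleton_eq_map (pvFin L)]
  rw [List.nil_append]
  apply List.ext_getElem
  · simpa using hlen
  · intro j h1 h2
    have hj : j < L.length := by simpa using h2
    have hmem : pvArt L[j] ∈ list_all_artists L := by
      rw [pv_artists_eq, PySem.Set.mem_ofList]
      exact List.mem_map.mpr ⟨L[j], List.getElem_mem hj, rfl⟩
    have hchr := hchar j hj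
    rw [if_pos hmem] at hchr
    obtain ⟨hjl, hval⟩ := List.getElem?_eq_some_iff.mp hchr
    rw [List.getElem_map, List.getElem_map, List.getElem_range, hval]
    exact pv_val_ref L rev j hj

theorem pv_groups_getD (L : List (List String)) (a : String) :
    (L.foldl (fun d music => d.modify (PySem.List.pyGetD music 1 "") [] (· ++ [music]))
      PySem.Dict.empty).getD a [] = pvGrp L a := by
  have h1 : L.foldl (fun d music => d.modify (PySem.List.pyGetD music 1 "") [] (· ++ [music]))
      PySem.Dict.empty
      = (L.map (fun m => (pvArt m, m))).foldl (fun d p => d.modify p.1 [] (· ++ [p.2]))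
        PySem.Dict.empty := by
    rw [List.foldl_map]; rfl
  rw [h1, PySem.Dict.getD_foldl_modify_append]
  simp [pvGrp, List.filter_map, List.map_map, Function.comp_def, PySem.Dict.getD_empty]

theorem pv_getD_insert_fold (ks : List String) (hnd : ks.Nodup)
    (G : List (List String) → List (List String)) :
    ∀ (d : PySem.Dict String (List (List String))) (a : String),
    (ks.foldl (fun d k => d.insert k (G (d.getD k []))) d).getD a []
      = if a ∈ ks then G (d.getD a []) else d.getD a [] := by
  induction ks with
  | nil => intro d a; simp
  | cons k t ih =>
    intro d a
    obtain ⟨hk, ht⟩ := List.nodup_cons.mp hnd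
    simp only [List.foldl_cons]
    rw [ih ht]
    by_cases hat : a ∈ t
    · have hne : a ≠ k := fun h => hk (h ▸ hat)
      simp [hat, hne, PySem.Dict.getD_insert]
    · by_cases hak : a = k
      · subst hak
        simp [hat, PySem.Dict.getD_insert_self]
      · simp [hat, hak, PySem.Dict.getD_insert]

theorem pv_sorted_nil (rev : Bool) : PySem.List.sorted ([] : List (List String)) pvKey rev = [] := by
  cases rev <;> rfl

theorem pv_groups2_getD (L : List (List String)) (rev : Bool) (a : String) :
    ((L.foldl (fun d music => d.modify (PySem.List.pyGetD music 1 "") [] (· ++ [music]))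
        PySem.Dict.empty).keys.foldl (fun d artist =>
          d.insert artist (PySem.List.sorted (d.getD artist [])
            (fun m => PySem.Str.lower (PySem.List.pyGetD m 2 "")) rev))
        (L.foldl (fun d music => d.modify (PySem.List.pyGetD music 1 "") [] (· ++ [music]))
          PySem.Dict.empty)).getD a []
      = PySem.List.sorted (pvGrp L a) pvKey rev := by
  set groups := L.foldl (fun d music => d.modify (PySem.List.pyGetD music 1 "") [] (· ++ [music]))
      PySem.Dict.empty with hgroups
  have hnd : groups.keys.Nodup := by
    rw [hgroups]
    exact PySem.Dict.nodup_keys_foldl_modify_key L (fun m => PySem.List.pyGetD m 1 "") []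
      (fun _ m => (· ++ [m])) PySem.Dict.empty (by simp [PySem.Dict.keys_empty])
  have hkeys : ∀ x, x ∈ groups.keys ↔ x ∈ L.map pvArt := by
    intro x
    rw [hgroups, PySem.Dict.keys_foldl_modify_key L (fun m => PySem.List.pyGetD m 1 "") []
      (fun _ m => (· ++ [m])) PySem.Dict.empty]
    simp only [PySem.Dict.keys_empty]
    rw [show (PySem.Set.update [] (L.map fun m => PySem.List.pyGetD m 1 "")) =
        PySem.Set.ofList (L.map fun m => PySem.List.pyGetD m 1 "") from PySem.Set.update_empty _]
    rw [PySem.Set.mem_ofList]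
    rfl
  have h := pv_getD_insert_fold groups.keys hnd
      (fun v => PySem.List.sorted v (fun m => PySem.Str.lower (PySem.List.pyGetD m 2 "")) rev)
      groups a
  simp only at h
  rw [h]
  by_cases ha : a ∈ groups.keys
  · simp only [ha, if_true]
    rw [hgroups, pv_groups_getD]
    rfl
  · simp only [ha, if_false]
    have hgrp : pvGrp L a = [] := by
      rw [pvGrp, List.filter_eq_nil_iff]
      intro m hm hba
      exact ha ((hkeys a).mpr (List.mem_map.mpr ⟨m, hm, by
        simpa [pvArt] using (beq_iff_eq.mp hba)⟩))
    rw [hgroups, pv_groups_getD, hgrp, pv_sorted_nil]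

theorem pv_B_loop (L : List (List String)) (rev : Bool) (Q : String → List (List String))
    (hQ : ∀ a, Q a = PySem.List.sorted (pvGrp L a) pvKey rev)
    (rest : List (List String)) :
    ∀ (pre acc : List (List String)) (cd : PySem.Dict String Int),
    L = pre ++ rest → (∀ a, cd.getD a 0 = ((pre.map pvArt).count a : Int)) →
    (rest.foldl (fun st music =>
        (st.1 ++ [PySem.List.pyGetD (Q (PySem.List.pyGetD music 1 ""))
            (st.2.getD (PySem.List.pyGetD music 1 "") 0) []],
         st.2.insert (PySem.List.pyGetD music 1 "")
            (st.2.getD (PySem.List.pyGetD music 1 "") 0 + 1))) (acc, cd)).1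
      = acc ++ (List.range' pre.length rest.length).map (pvRef L rev) := by
  induction rest with
  | nil => intro pre acc cd _ _; simp
  | cons m rest ih =>
    intro pre acc cd hL hc
    have hget : L.getD pre.length [] = m := by
      rw [hL]
      rw [List.getD_eq_getElem _ _ (by simp)]
      rw [List.getElem_append_right (le_refl _)]
      simp
    have htake : L.take pre.length = pre := by rw [hL]; exact List.take_left
    have hcnt : pvCnt L pre.length = (pre.map pvArt).count (pvArt m) := by
      rw [pvCnt, htake, hget, List.count_eq_countP, List.countP_map]
      rfl
    have helem : PySem.List.pyGetD (Q (PySem.List.pyGetD m 1 ""))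
        (cd.getD (PySem.List.pyGetD m 1 "") 0) [] = pvRef L rev pre.length := by
      show PySem.List.pyGetD (Q (pvArt m)) (cd.getD (pvArt m) 0) [] = _
      rw [hQ, hc, pvRef, hget, ← hcnt]
    have hc' : ∀ a, (cd.insert (PySem.List.pyGetD m 1 "")
        (cd.getD (PySem.List.pyGetD m 1 "") 0 + 1)).getD a 0
        = (((pre ++ [m]).map pvArt).count a : Int) := by
      intro a
      show (cd.insert (pvArt m) (cd.getD (pvArt m) 0 + 1)).getD a 0 = _
      rw [PySem.Dict.getD_insert]
      by_cases hak : a = pvArt m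
      · subst hak
        rw [if_pos rfl, hc]
        simp [List.count_append]
      · rw [if_neg hak, hc]
        have : (([pvArt m]).count a) = 0 := by
          simp [List.count_singleton]
          exact fun h => hak h.symm
        simp [List.count_append, this]
    have hL' : L = (pre ++ [m]) ++ rest := by rw [hL]; simp
    simp only [List.foldl_cons]
    rw [helem]
    have := ih (pre ++ [m]) (acc ++ [pvRef L rev pre.length]) _ hL' hc'
    rw [this]
    simp [List.range'_succ, List.append_assoc]

theorem pv_B_eq (L : List (List String)) (rev : Bool) :
    sort_musics_of_artists_alphabetically_alt L rev = (List.range L.length).map (pvRef L rev) := by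
  have h := pv_B_loop L rev
    (fun a => ((L.foldl (fun d music => d.modify (PySem.List.pyGetD music 1 "") [] (· ++ [music]))
        PySem.Dict.empty).keys.foldl (fun d artist =>
          d.insert artist (PySem.List.sorted (d.getD artist [])
            (fun m => PySem.Str.lower (PySem.List.pyGetD m 2 "")) rev))
        (L.foldl (fun d music => d.modify (PySem.List.pyGetD music 1 "") [] (· ++ [music]))
          PySem.Dict.empty)).getD a [])
    (fun a => pv_groups2_getD L rev a) L [] [] PySem.Dict.empty rfl
    (by intro a; simp [PySem.Dict.getD_empty])
  simp only [sort_musics_of_artists_alphabetically_alt]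
  simpa [List.range_eq_range'] using h

-- ===== VERDICT (by name: the statement is the Claim_ definition above) =====
theorem sort_musics_of_artists_alphabetically_spec : Claim_equal_sort_musics_of_artists_alphabetically := by
  intro L rev _ _
  unfold Spec_sort_musics_of_artists_alphabetically
  rw [pv_A_eq, pv_B_eq]
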